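-- pv_equiv track=rewrite | github.com/aidenyyhh/Social_Media_Analytics | Social_Media_Analytics.py | getHashtagRates
-- ===== SOURCE A (Python) =====
-- def getHashtagRates(data):
--     hashtags = {}
--     tags = data["hashtags"]
--
--     for tag in tags:
--         if type(tag) == str:
--             if tag not in hashtags:
--                 hashtags[tag] = 1
--             else:
--                 hashtags[tag] += 1
--
--         elif type(tag) == list:
--             for subtag in tag:
--                 if subtag not in hashtags:
--                     hashtags[subtag] = 1
--                 else:
--                     hashtags[subtag] += 1
--
--     return hashtags
-- ===== SOURCE B (Python) =====
-- def getHashtagRates(data):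
--     # Two-phase: flatten one level with a generator (str tags as-is, list tags
--     # element-wise, other types skipped, exactly as A's branches), then tally
--     # each distinct tag (first-occurrence order) with list.count.
--     def flatten(tags):
--         for tag in tags:
--             if type(tag) == str:
--                 yield tag
--             elif type(tag) == list:
--                 yield from tag
--     flat = list(flatten(data["hashtags"]))
--     return {t: flat.count(t) for t in dict.fromkeys(flat)}
-- ===== Notes on version B (the rewrite author's own statement) =====
-- stated objective: alternative
-- what changed: A tallies in one pass with an inline membership-branching dict update; B first flattens the tag list (strings as-is, nested lists one level, other types skipped, same as A's branches), then builds the result as a comprehension over the first-occurrence-deduplicated tags using list.count per distinct tag.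
import Mathlib
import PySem

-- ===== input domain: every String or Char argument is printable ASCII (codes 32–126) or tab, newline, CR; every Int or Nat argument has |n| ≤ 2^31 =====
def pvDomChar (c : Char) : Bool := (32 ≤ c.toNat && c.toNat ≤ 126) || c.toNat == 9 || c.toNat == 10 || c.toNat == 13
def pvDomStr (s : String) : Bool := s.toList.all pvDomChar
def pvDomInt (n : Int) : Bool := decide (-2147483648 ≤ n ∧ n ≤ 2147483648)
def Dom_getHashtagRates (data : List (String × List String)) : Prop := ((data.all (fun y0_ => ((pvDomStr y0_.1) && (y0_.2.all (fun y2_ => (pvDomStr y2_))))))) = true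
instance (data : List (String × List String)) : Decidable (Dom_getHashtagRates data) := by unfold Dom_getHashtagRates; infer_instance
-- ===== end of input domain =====

-- B rewrites A's single-pass branching tally as flatten + dedup + per-tag count (alternative decomposition, not faster).
-- NOTE on the given input type: List (String × List String) models dicts whose "hashtags" value is a
-- list of strings, so in the Lean ports every tag takes A's str branch and B's flatten yields each
-- element unchanged; Python B nonetheless replicates A's nested-list (one level) and skip-other-types
-- branches exactly, and the differential tester checks both ports against their Pythons on this type.

-- ===== PORT A =====
def getHashtagRates (data : List (String × List String)) : List (String × Int) :=
  let hashtags : PySem.Dict String Int := PySem.Dict.empty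
  let tags := PySem.Dict.getD (PySem.Dict.mk data) "hashtags" []
  (tags.foldl (fun h tag =>
      if h.contains tag = false then h.insert tag 1
      else h.insert tag (h.getD tag 0 + 1)) hashtags).items

-- ===== PORT B =====
-- flatten: on this input type every element is a str, so the generator yields each tag as-is
def pvFlattenB (tags : List String) : List String :=
  tags.foldr (fun tag acc => tag :: acc) []

def getHashtagRates_alt (data : List (String × List String)) : List (String × Int) :=
  let flat := pvFlattenB (PySem.Dict.getD (PySem.Dict.mk data) "hashtags" [])
  (PySem.List.dedup flat).map (fun t => (t, (flat.count t : Int)))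

-- ===== PRECONDITION & SPEC =====
-- Pre_ excludes the dicts without a "hashtags" key: there A (and B alike) raises KeyError.
def Pre_getHashtagRates (data : List (String × List String)) : Prop :=
  (PySem.Dict.mk data).contains "hashtags" = true
instance (data : List (String × List String)) : Decidable (Pre_getHashtagRates data) := by
  unfold Pre_getHashtagRates; infer_instance

def pvWitness_getHashtagRates : (List (String × List String)) := [("hashtags", ["a", "b", "a"])]

def Spec_getHashtagRates (data : List (String × List String)) (out : List (String × Int)) : Prop := out = getHashtagRates_alt data
instance (data : List (String × List String)) (out : List (String × Int)) : Decidable (Spec_getHashtagRates data out) := by unfold Spec_getHashtagRates; infer_instance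

-- ===== CLAIM (what is proved, stated in full; the proofs are below) =====
def Claim_equal_getHashtagRates : Prop := ∀ (data : List (String × List String)), Dom_getHashtagRates data → Pre_getHashtagRates data → Spec_getHashtagRates data (getHashtagRates data)

-- ===== LEMMAS AND PROOFS =====

-- A's branched update coincides with the unbranched counter update.
lemma pvStep_eq (h : PySem.Dict String Int) (tag : String) :
    (if h.contains tag = false then h.insert tag 1
     else h.insert tag (h.getD tag 0 + 1)) = h.insert tag (h.getD tag 0 + 1) := by
  by_cases hc : h.contains tag = false
  · simp [hc, PySem.Dict.getD_of_not_contains h 0 hc]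
  · simp [hc]

lemma pvFlattenB_eq (tags : List String) : pvFlattenB tags = tags := by
  induction tags with
  | nil => rfl
  | cons t ts ih => simpa [pvFlattenB] using ih

-- ===== VERDICT (by name: the statement is the Claim_ definition above) =====
theorem getHashtagRates_spec : Claim_equal_getHashtagRates := by
  intro data _ _
  unfold Spec_getHashtagRates getHashtagRates getHashtagRates_alt
  simp only [pvFlattenB_eq]
  rw [PySem.List.foldl_congr_mem _ _
        (fun h tag => h.insert tag (h.getD tag 0 + 1)) _
        (fun acc x _ => pvStep_eq acc x),
      PySem.Dict.foldl_insert_getD_add_one_eq_counter,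
      PySem.Dict.items_counter, PySem.List.dedup_eq_ofList]
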